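-- pv_equiv track=rewrite | github.com/broadinstitute/mas-seq-paper-data | scripts/preprint/scrna_seq_analysis/sources/isoform_utils.py | merge_alignment_blocks
-- ===== SOURCE A (Python) =====
-- from typing import NamedTuple, List, Tuple, Dict, Any
--
-- def merge_alignment_blocks(
--         raw_alignment_blocks: List[Tuple[int, int]],
--         alignment_block_min_gap: int) -> List[Tuple[int, int]]:
--     """Merges adjacent gapped alignment blocks if they are close to one another (e.g. due to insertions)."""
--     if len(raw_alignment_blocks) <= 1:
--         return raw_alignment_blocks
--     merged_blocks = []
--     prev_start = raw_alignment_blocks[0][0]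
--     prev_end = raw_alignment_blocks[0][1]
--     for raw_block in raw_alignment_blocks[1:]:
--         curr_start, curr_end = raw_block
--         assert curr_start >= prev_end, "The blocks must be non-overlapping and coordinate sorted!"
--         if curr_start - prev_end < alignment_block_min_gap:
--             prev_end = curr_end
--             continue
--         else:
--             merged_blocks.append((prev_start, prev_end))
--             prev_start, prev_end = curr_start, curr_end
--     merged_blocks.append((prev_start, prev_end))
--     return merged_blocks
-- ===== SOURCE B (Python) =====
-- def merge_alignment_blocks(raw_alignment_blocks, alignment_block_min_gap):
--     """Merges adjacent gapped alignment blocks, scanning right-to-left and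
--     building the result back-to-front."""
--     if len(raw_alignment_blocks) <= 1:
--         return raw_alignment_blocks
--     merged = []
--     for start, end in reversed(raw_alignment_blocks):
--         if merged:
--             nstart, nend = merged[0]
--             assert nstart >= end, "The blocks must be non-overlapping and coordinate sorted!"
--             if nstart - end < alignment_block_min_gap:
--                 merged[0] = (start, nend)
--                 continue
--         merged.insert(0, (start, end))
--     return merged
-- ===== Notes on version B (the rewrite author's own statement) =====
-- stated objective: alternative
-- what changed: A scans left-to-right keeping a pending (prev_start, prev_end) accumulator and appends a finished group at each large gap; B scans the blocks right-to-left with no pending state, prepending a new group or extending the head group's start, building the result back-to-front.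
import Mathlib
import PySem

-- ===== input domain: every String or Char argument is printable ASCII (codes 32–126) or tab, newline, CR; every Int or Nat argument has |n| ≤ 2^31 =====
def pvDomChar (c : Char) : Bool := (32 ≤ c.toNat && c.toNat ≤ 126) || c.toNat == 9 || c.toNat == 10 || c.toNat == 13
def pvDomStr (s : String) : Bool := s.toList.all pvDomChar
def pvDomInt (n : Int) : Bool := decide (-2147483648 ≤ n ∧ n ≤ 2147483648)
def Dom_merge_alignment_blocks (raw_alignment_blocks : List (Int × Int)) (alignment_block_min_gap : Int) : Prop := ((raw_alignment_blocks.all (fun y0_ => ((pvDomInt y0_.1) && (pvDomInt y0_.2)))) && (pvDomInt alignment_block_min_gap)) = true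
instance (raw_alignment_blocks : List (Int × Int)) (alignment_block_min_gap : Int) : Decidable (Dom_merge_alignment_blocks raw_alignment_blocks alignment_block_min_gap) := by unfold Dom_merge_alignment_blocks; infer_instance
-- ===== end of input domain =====

-- ===== PORT A =====
-- B re-traverses the list right-to-left building the output back-to-front; A keeps a pending-group accumulator left-to-right. Equivalence on Pre_ (non-overlapping, coordinate-sorted blocks; A raises AssertionError otherwise).
def merge_alignment_blocks (raw_alignment_blocks : List (Int × Int)) (alignment_block_min_gap : Int) : List (Int × Int) :=
  if raw_alignment_blocks.length ≤ 1 then raw_alignment_blocks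
  else
    match raw_alignment_blocks with
    | [] => []
    | x :: rest =>
      -- merged_blocks, prev_start, prev_end threaded through the for-loop over raw_alignment_blocks[1:]
      let st := rest.foldl
        (fun (acc : List (Int × Int) × Int × Int) (raw_block : Int × Int) =>
          -- assert curr_start >= prev_end: inputs violating it are excluded by Pre_
          if raw_block.1 - acc.2.2 < alignment_block_min_gap then
            (acc.1, acc.2.1, raw_block.2)
          else
            (acc.1 ++ [(acc.2.1, acc.2.2)], raw_block.1, raw_block.2))
        ([], x.1, x.2)
      st.1 ++ [(st.2.1, st.2.2)]

-- ===== PORT B =====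
-- one step of B's right-to-left loop: prepend a new group, or extend the head group's start
def mabStep (alignment_block_min_gap : Int) (b : Int × Int) (merged : List (Int × Int)) : List (Int × Int) :=
  match merged with
  | [] => [b]
  | (nstart, nend) :: rest =>
    -- assert nstart >= b.2: inputs violating it are excluded by Pre_
    if nstart - b.2 < alignment_block_min_gap then (b.1, nend) :: rest
    else b :: (nstart, nend) :: rest

-- 'for start, end in reversed(raw_alignment_blocks)' updating the front of merged = foldl over the reversed list
def merge_alignment_blocks_alt (raw_alignment_blocks : List (Int × Int)) (alignment_block_min_gap : Int) : List (Int × Int) :=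
  if raw_alignment_blocks.length ≤ 1 then raw_alignment_blocks
  else raw_alignment_blocks.reverse.foldl (fun merged b => mabStep alignment_block_min_gap b merged) []

-- ===== PRECONDITION & SPEC =====
-- Pre_ excludes exactly the inputs where A raises AssertionError: some adjacent pair overlaps / is out of order.
def Pre_merge_alignment_blocks (raw_alignment_blocks : List (Int × Int)) (alignment_block_min_gap : Int) : Prop :=
  List.IsChain (fun a b => a.2 ≤ b.1) raw_alignment_blocks
instance (raw_alignment_blocks : List (Int × Int)) (alignment_block_min_gap : Int) : Decidable (Pre_merge_alignment_blocks raw_alignment_blocks alignment_block_min_gap) := by unfold Pre_merge_alignment_blocks; infer_instance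

def pvWitness_merge_alignment_blocks : (List (Int × Int)) × Int := ([((0 : Int), (2 : Int)), ((3 : Int), (5 : Int)), ((9 : Int), (12 : Int))], (3 : Int))

def Spec_merge_alignment_blocks (raw_alignment_blocks : List (Int × Int)) (alignment_block_min_gap : Int) (out : List (Int × Int)) : Prop := out = merge_alignment_blocks_alt raw_alignment_blocks alignment_block_min_gap
instance (raw_alignment_blocks : List (Int × Int)) (alignment_block_min_gap : Int) (out : List (Int × Int)) : Decidable (Spec_merge_alignment_blocks raw_alignment_blocks alignment_block_min_gap out) := by unfold Spec_merge_alignment_blocks; infer_instance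

-- ===== CLAIM (what is proved, stated in full; the proofs are below) =====
def Claim_equal_merge_alignment_blocks : Prop := ∀ (raw_alignment_blocks : List (Int × Int)) (alignment_block_min_gap : Int), Dom_merge_alignment_blocks raw_alignment_blocks alignment_block_min_gap → Pre_merge_alignment_blocks raw_alignment_blocks alignment_block_min_gap → Spec_merge_alignment_blocks raw_alignment_blocks alignment_block_min_gap (merge_alignment_blocks raw_alignment_blocks alignment_block_min_gap)

-- ===== LEMMAS AND PROOFS =====

-- canonical recursion both ports are reduced to: merge starting from a pending group (ps, pe)
def goMab (g ps pe : Int) (t : List (Int × Int)) : List (Int × Int) :=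
  match t with
  | [] => [(ps, pe)]
  | (cs, ce) :: t' => if cs - pe < g then goMab g ps ce t' else (ps, pe) :: goMab g cs ce t'

-- A's foldl with accumulator equals merged-so-far ++ goMab
theorem mab_foldl_eq_go (g : Int) (t : List (Int × Int)) :
    ∀ (m : List (Int × Int)) (ps pe : Int),
    (let st := t.foldl
        (fun (acc : List (Int × Int) × Int × Int) (rb : Int × Int) =>
          if rb.1 - acc.2.2 < g then (acc.1, acc.2.1, rb.2)
          else (acc.1 ++ [(acc.2.1, acc.2.2)], rb.1, rb.2)) (m, ps, pe)
     st.1 ++ [(st.2.1, st.2.2)]) = m ++ goMab g ps pe t := by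
  induction t with
  | nil => intro m ps pe; simp [goMab]
  | cons hd tl ih =>
    intro m ps pe
    obtain ⟨cs, ce⟩ := hd
    by_cases h : cs - pe < g <;> simp [List.foldl_cons, goMab, h, ih]

-- goMab's result always starts with a group whose start is ps, and the rest does not depend on ps
theorem goMab_start_irrel (g : Int) (t : List (Int × Int)) :
    ∀ (e s s' : Int), ∃ ne tl, goMab g s e t = (s, ne) :: tl ∧ goMab g s' e t = (s', ne) :: tl := by
  induction t with
  | nil => intro e s s'; exact ⟨e, [], rfl, rfl⟩
  | cons hd tl ih =>
    intro e s s'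
    obtain ⟨cs, ce⟩ := hd
    by_cases h : cs - e < g
    · obtain ⟨ne, tl', h1, h2⟩ := ih ce s s'
      exact ⟨ne, tl', by simp [goMab, h, h1], by simp [goMab, h, h2]⟩
    · exact ⟨e, goMab g cs ce tl, by simp [goMab, h], by simp [goMab, h]⟩

-- B's foldr equals goMab
theorem mab_foldr_eq_go (g : Int) (t : List (Int × Int)) :
    ∀ (ps pe : Int), List.foldr (mabStep g) [] ((ps, pe) :: t) = goMab g ps pe t := by
  induction t with
  | nil => intro ps pe; rfl
  | cons hd tl ih =>
    intro ps pe
    obtain ⟨cs, ce⟩ := hd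
    have hrec : List.foldr (mabStep g) [] ((cs, ce) :: tl) = goMab g cs ce tl := ih cs ce
    by_cases h : cs - pe < g
    · obtain ⟨ne, tl', h1, h2⟩ := goMab_start_irrel g tl ce cs ps
      simp only [List.foldr_cons] at hrec ⊢
      rw [hrec, h1, mabStep, if_pos h, goMab, if_pos h, h2]
    · simp only [List.foldr_cons] at hrec ⊢
      rw [hrec]
      obtain ⟨ne, tl', h1, _⟩ := goMab_start_irrel g tl ce cs cs
      rw [h1, mabStep, if_neg h, goMab, if_neg h, h1]

-- ===== VERDICT (by name: the statement is the Claim_ definition above) =====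
theorem merge_alignment_blocks_spec : Claim_equal_merge_alignment_blocks := by
  intro xs g _ _
  unfold Spec_merge_alignment_blocks
  match xs with
  | [] => rfl
  | [x] => rfl
  | (ps, pe) :: b :: rest =>
    have hlen : ¬ ((ps, pe) :: b :: rest).length ≤ 1 := by simp
    rw [merge_alignment_blocks, merge_alignment_blocks_alt, if_neg hlen, if_neg hlen]
    dsimp only
    have hA := mab_foldl_eq_go g (b :: rest) [] ps pe
    simp only [List.nil_append] at hA
    rw [hA, List.foldl_reverse]
    exact (mab_foldr_eq_go g (b :: rest) ps pe).symm
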